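-- pv_equiv track=rewrite | github.com/MJenkinsonGIT/SDKConsolidationScript | build_sdk_reference.py | _device_in_supported_list
-- ===== SOURCE A (Python) =====
-- def _norm_device(s: str) -> str:
--     import unicodedata
--     s = s.replace('\u2122', '').replace('\u00ae', '').replace('\u00a9', '')
--     s = unicodedata.normalize('NFKD', s)
--     return ''.join(c for c in s if c.isascii() and c.isalnum()).lower()
--
-- def _device_in_supported_list(device_id: str, list_items: list) -> bool:
--     norm_id = _norm_device(device_id)
--     for item in list_items:
--         if _norm_device(item) == norm_id:
--             return True
--         for part in item.split('/'):
--             if _norm_device(part.strip()) == norm_id: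
--                 return True
--     return False
-- ===== SOURCE B (Python) =====
-- def _device_in_supported_list(device_id: str, list_items: list) -> bool:
--     # Streaming character automaton: normalize the query once, then scan each item
--     # character by character, tracking two match pointers (whole item / current
--     # '/'-part), never building normalized strings or split lists for the items.
--     target = [c.lower() for c in device_id if c.isascii() and c.isalnum()]
--     n = len(target)
--     for item in list_items:
--         g, gok = 0, True   # whole-item match pointer / still-a-prefix flag
--         p, pok = 0, True   # current-part match pointer / flag (reset at '/')
--         for c in item:
--             if c == '/':
--                 if pok and p == n:
--                     return True
--                 p, pok = 0, True
--             elif c.isascii() and c.isalnum():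
--                 d = c.lower()
--                 if gok and g < n and target[g] == d:
--                     g += 1
--                 else:
--                     gok = False
--                 if pok and p < n and target[p] == d:
--                     p += 1
--                 else:
--                     pok = False
--             # other characters (whitespace, punctuation) are dropped by
--             # normalization, so they leave both matchers untouched
--         if (gok and g == n) or (pok and p == n):
--             return True
--     return False
-- ===== Notes on version B (the rewrite author's own statement) =====
-- stated objective: faster
-- what changed: B replaces A's normalize-then-compare scan (which builds a normalized string for every item and every '/'-part via unicodedata and compares each to the normalized id) by a streaming character automaton: it normalizes only the query, then walks each item once, advancing two prefix-match pointers (whole item / current part, reset at '/'), never materializing normalized strings or split lists.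
import Mathlib
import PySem

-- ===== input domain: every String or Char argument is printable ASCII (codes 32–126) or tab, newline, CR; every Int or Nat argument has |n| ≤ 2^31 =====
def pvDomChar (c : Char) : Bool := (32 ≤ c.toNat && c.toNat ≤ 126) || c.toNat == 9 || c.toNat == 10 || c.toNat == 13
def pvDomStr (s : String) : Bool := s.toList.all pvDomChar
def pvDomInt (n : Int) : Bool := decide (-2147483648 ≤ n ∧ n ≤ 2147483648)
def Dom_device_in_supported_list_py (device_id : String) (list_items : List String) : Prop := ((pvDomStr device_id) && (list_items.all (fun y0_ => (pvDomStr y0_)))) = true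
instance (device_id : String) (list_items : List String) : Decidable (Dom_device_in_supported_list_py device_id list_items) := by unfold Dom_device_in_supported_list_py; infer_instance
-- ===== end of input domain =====

-- B replaces A's normalize-and-compare scan by a streaming character automaton over each
-- item (two prefix-match pointers, reset at '/'), never building normalized strings or split lists.


-- ===== PORT A =====
-- the '™'/'®'/'©' replacements and NFKD normalization of A's _norm_device are identity on the
-- ASCII input domain (Dom); the keep-ascii-alnum filter and the final .lower() are ported exactly
def pvNormA (cs : List Char) : List Char :=
  PySem.Chars.lower (cs.filter (fun c => decide (c.toNat ≤ 127) && PySem.Chars.isalnum c))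

-- the inner 'for part … return True' is the early-return scan List.any
def pvLoopA (norm_id : List Char) : List String → Bool
  | [] => false
  | item :: rest =>
    if pvNormA item.toList == norm_id then true
    else if (PySem.Chars.splitOn item.toList ['/']).any
              (fun part => pvNormA (PySem.Chars.strip part) == norm_id) then true
    else pvLoopA norm_id rest

def device_in_supported_list_py (device_id : String) (list_items : List String) : Bool :=
  pvLoopA (pvNormA device_id.toList) list_items

-- ===== PORT B =====
-- target = [c.lower() for c in device_id if c.isascii() and c.isalnum()]
def pvNormB (cs : List Char) : List Char :=
  (cs.filter (fun c => decide (c.toNat ≤ 127) && PySem.Chars.isalnum c)).map PySem.Chars.lowerChar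

-- one pointer update: 'ok and j < n and target[j] == d' is exactly tgt[j]? = some d
-- (the bound check j < n is what makes target[j] total, so no IndexError is possible)
def pvUpd (tgt : List Char) (j : Nat) (ok : Bool) (d : Char) : Nat × Bool :=
  if ok && (tgt[j]? == some d) then (j + 1, true) else (j, false)

-- the inner per-character loop; 'none' encodes the early 'return True' at a '/'
def pvScanB (tgt : List Char) : List Char → Nat × Bool × Nat × Bool → Option (Nat × Bool × Nat × Bool)
  | [], st => some st
  | c :: cs, (g, gok, p, pok) =>
    if c == '/' then
      if pok && (p == tgt.length) then none
      else pvScanB tgt cs (g, gok, 0, true)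
    else if decide (c.toNat ≤ 127) && PySem.Chars.isalnum c then
      let d := PySem.Chars.lowerChar c
      let s1 := pvUpd tgt g gok d
      let s2 := pvUpd tgt p pok d
      pvScanB tgt cs (s1.1, s1.2, s2.1, s2.2)
    else pvScanB tgt cs (g, gok, p, pok)

def pvItemB (tgt : List Char) (item : List Char) : Bool :=
  match pvScanB tgt item (0, true, 0, true) with
  | none => true
  | some (g, gok, p, pok) => (gok && (g == tgt.length)) || (pok && (p == tgt.length))

def pvLoopB (tgt : List Char) : List String → Bool
  | [] => false
  | item :: rest => if pvItemB tgt item.toList then true else pvLoopB tgt rest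

def device_in_supported_list_py_alt (device_id : String) (list_items : List String) : Bool :=
  pvLoopB (pvNormB device_id.toList) list_items

-- ===== PRECONDITION & SPEC =====
def Spec_device_in_supported_list_py (device_id : String) (list_items : List String) (out : Bool) : Prop := out = device_in_supported_list_py_alt device_id list_items
instance (device_id : String) (list_items : List String) (out : Bool) : Decidable (Spec_device_in_supported_list_py device_id list_items out) := by unfold Spec_device_in_supported_list_py; infer_instance

-- ===== CLAIM =====
def Claim_equal_device_in_supported_list_py : Prop := ∀ (device_id : String) (list_items : List String), Dom_device_in_supported_list_py device_id list_items → Spec_device_in_supported_list_py device_id list_items (device_in_supported_list_py device_id list_items)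

-- ===== LEMMAS AND PROOFS =====

theorem pvNormA_eq_pvNormB (cs : List Char) : pvNormA cs = pvNormB cs := rfl

-- ---- A-side: strip is invisible to normalization ----
theorem pv_isspace_not_pred (c : Char) (h : PySem.Chars.isspace c = true) :
    (decide (c.toNat ≤ 127) && PySem.Chars.isalnum c) = false := by
  simp only [PySem.Chars.isspace] at h
  simp only [PySem.Chars.isalnum, PySem.Chars.isalpha, PySem.Chars.isdigit,
    PySem.Chars.isupper, PySem.Chars.islower, Char.le_def] at *
  simp only [Bool.or_eq_true, Bool.and_eq_true, decide_eq_true_eq] at h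
  simp only [Bool.and_eq_false_iff, Bool.or_eq_false_iff, decide_eq_false_iff_not, not_le,
    UInt32.le_iff_toNat_le, Char.toNat] at *
  have hA : 'A'.val.toNat = 65 := rfl
  have hZ : 'Z'.val.toNat = 90 := rfl
  have ha : 'a'.val.toNat = 97 := rfl
  have hz : 'z'.val.toNat = 122 := rfl
  have h0 : '0'.val.toNat = 48 := rfl
  have h9 : '9'.val.toNat = 57 := rfl
  omega

theorem pv_filter_dropWhile (p q : Char → Bool) (h : ∀ c, q c = true → p c = false)
    (cs : List Char) : (cs.dropWhile q).filter p = cs.filter p := by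
  induction cs with
  | nil => rfl
  | cons c cs ih =>
    by_cases hq : q c = true
    · simp [hq, h c hq, ih]
    · simp [hq]

theorem pvNormA_strip (cs : List Char) : pvNormA (PySem.Chars.strip cs) = pvNormA cs := by
  unfold pvNormA PySem.Chars.strip PySem.Chars.lstrip PySem.Chars.rstrip
  congr 1
  rw [List.filter_reverse, pv_filter_dropWhile _ _ pv_isspace_not_pred, List.filter_reverse,
    List.reverse_reverse, pv_filter_dropWhile _ _ pv_isspace_not_pred]

theorem pvLoopA_iff (norm_id : List Char) (items : List String) :
    pvLoopA norm_id items = true ↔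
      ∃ item ∈ items, pvNormA item.toList = norm_id ∨
        ∃ part ∈ PySem.Chars.splitOn item.toList ['/'], pvNormA (PySem.Chars.strip part) = norm_id := by
  induction items with
  | nil => simp [pvLoopA]
  | cons item rest ih =>
    simp only [pvLoopA]
    split_ifs with h1 h2
    · simp only [beq_iff_eq] at h1
      simp [h1]
    · simp only [List.any_eq_true, beq_iff_eq] at h2
      rcases h2 with ⟨part, hp, h⟩
      simp only [true_iff]
      exact ⟨item, by simp, Or.inr ⟨part, hp, h⟩⟩
    · simp only [beq_iff_eq] at h1
      simp only [List.any_eq_true, beq_iff_eq, not_exists, not_and] at h2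
      rw [ih]
      constructor
      · rintro ⟨i, hi, h⟩; exact ⟨i, by simp [hi], h⟩
      · rintro ⟨i, hi, h⟩
        rcases List.mem_cons.mp hi with rfl | hi
        · rcases h with h | ⟨part, hp, h⟩
          · exact absurd h h1
          · exact absurd h (h2 part hp)
        · exact ⟨i, hi, h⟩

-- ---- splitOn on a single-char separator, as a structural recursion ----
def pvSplit : List Char → List (List Char)
  | [] => [[]]
  | c :: cs => if c = '/' then [] :: pvSplit cs else (pvSplit cs).modifyHead (c :: ·)

theorem pv_go_zero (sep l cur : List Char) (acc : List (List Char)) :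
    PySem.Chars.splitOn.go sep 0 l cur acc = ((cur.reverse ++ l) :: acc).reverse := by
  rw [PySem.Chars.splitOn.go]

theorem pv_go_nil (sep : List Char) (f : Nat) (cur : List Char) (acc : List (List Char)) :
    PySem.Chars.splitOn.go sep (f + 1) [] cur acc = (cur.reverse :: acc).reverse := by
  rw [PySem.Chars.splitOn.go]
  simp

theorem pv_go_cons (sep : List Char) (f : Nat) (c : Char) (l cur : List Char) (acc : List (List Char)) :
    PySem.Chars.splitOn.go sep (f + 1) (c :: l) cur acc =
      if sep.isPrefixOf (c :: l) then
        PySem.Chars.splitOn.go sep f (List.drop sep.length (c :: l)) [] (cur.reverse :: acc)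
      else PySem.Chars.splitOn.go sep f l (c :: cur) acc := by
  rw [PySem.Chars.splitOn.go]

theorem pv_go_acc (fuel : Nat) : ∀ (l cur : List Char) (acc : List (List Char)),
    PySem.Chars.splitOn.go ['/'] fuel l cur acc
      = acc.reverse ++ PySem.Chars.splitOn.go ['/'] fuel l cur [] := by
  induction fuel with
  | zero =>
    intro l cur acc
    rw [pv_go_zero, pv_go_zero]
    simp
  | succ f ih =>
    intro l cur acc
    cases l with
    | nil =>
      rw [pv_go_nil, pv_go_nil]
      simp
    | cons c rest =>
      rw [pv_go_cons, pv_go_cons]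
      by_cases h : List.isPrefixOf ['/'] (c :: rest)
      · rw [if_pos h, if_pos h]
        rw [ih (List.drop ['/'].length (c :: rest)) [] (cur.reverse :: acc),
            ih (List.drop ['/'].length (c :: rest)) [] [cur.reverse]]
        simp
      · rw [if_neg h, if_neg h]
        exact ih rest (c :: cur) acc

theorem pv_modifyHead_modifyHead (l : List (List Char)) (f g : List Char → List Char) :
    (l.modifyHead g).modifyHead f = l.modifyHead (fun x => f (g x)) := by
  cases l <;> simp

theorem pv_go_cur (fuel : Nat) : ∀ (l cur : List Char),
    PySem.Chars.splitOn.go ['/'] fuel l cur []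
      = (PySem.Chars.splitOn.go ['/'] fuel l [] []).modifyHead (cur.reverse ++ ·) := by
  induction fuel with
  | zero =>
    intro l cur
    rw [pv_go_zero, pv_go_zero]
    simp
  | succ f ih =>
    intro l cur
    cases l with
    | nil =>
      rw [pv_go_nil, pv_go_nil]
      simp
    | cons c rest =>
      rw [pv_go_cons, pv_go_cons]
      by_cases h : List.isPrefixOf ['/'] (c :: rest)
      · rw [if_pos h, if_pos h]
        simp only [List.reverse_nil]
        rw [pv_go_acc f (List.drop ['/'].length (c :: rest)) [] [cur.reverse],
            pv_go_acc f (List.drop ['/'].length (c :: rest)) [] [[]]]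
        cases PySem.Chars.splitOn.go ['/'] f (List.drop ['/'].length (c :: rest)) [] [] <;> simp
      · rw [if_neg h, if_neg h]
        rw [ih rest (c :: cur), ih rest [c], pv_modifyHead_modifyHead]
        cases PySem.Chars.splitOn.go ['/'] f rest [] [] <;> simp

theorem pv_splitOn_eq (cs : List Char) : PySem.Chars.splitOn cs ['/'] = pvSplit cs := by
  induction cs with
  | nil =>
    rw [PySem.Chars.splitOn]
    simp only [List.length_nil, Nat.zero_add]
    rw [pv_go_nil]
    simp [pvSplit]
  | cons c cs ih =>
    rw [PySem.Chars.splitOn]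
    simp only [List.length_cons]
    rw [pv_go_cons]
    have hpref : List.isPrefixOf ['/'] (c :: cs) = ('/' == c) := by
      simp [List.isPrefixOf]
    by_cases hc : c = '/'
    · subst hc
      rw [hpref]
      simp only [beq_self_eq_true, if_true, List.length_singleton, List.drop_succ_cons,
        List.drop_zero, List.reverse_nil]
      rw [pv_go_acc]
      rw [PySem.Chars.splitOn] at ih
      rw [ih]
      simp [pvSplit]
    · rw [hpref]
      have hne : ('/' == c) = false := by
        simp [beq_eq_false_iff_ne]; exact fun h => hc h.symm
      rw [hne, if_neg (by simp)]
      rw [pv_go_cur]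
      rw [PySem.Chars.splitOn] at ih
      rw [ih]
      simp only [pvSplit, if_neg hc]
      cases pvSplit cs <;> simp

theorem pvSplit_ne_nil (cs : List Char) : pvSplit cs ≠ [] := by
  induction cs with
  | nil => simp [pvSplit]
  | cons c cs ih =>
    simp only [pvSplit]
    split_ifs
    · simp
    · cases h : pvSplit cs with
      | nil => exact absurd h ih
      | cons a t => simp

-- ---- the automaton invariant ----
theorem pv_prefix_snoc (A : List Char) (d : Char) (t : List Char) :
    (A ++ [d] <+: t) ↔ (A <+: t ∧ t[A.length]? = some d) := by
  constructor
  · rintro ⟨r, hr⟩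
    refine ⟨⟨[d] ++ r, by simpa using hr⟩, ?_⟩
    rw [← hr, List.append_assoc, List.getElem?_append_right (le_refl _)]
    simp
  · rintro ⟨⟨r, hr⟩, hget⟩
    subst hr
    rw [List.getElem?_append_right (le_refl _), Nat.sub_self] at hget
    cases r with
    | nil => simp at hget
    | cons x r =>
      simp only [List.getElem?_cons_zero, Option.some.injEq] at hget
      subst hget
      exact ⟨r, by simp⟩

theorem pv_done_iff (tgt A : List Char) (j : Nat) (ok : Bool)
    (h1 : ok = true ↔ A <+: tgt) (h2 : ok = true → j = A.length) :
    ((ok && (j == tgt.length)) = true ↔ A = tgt) := by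
  constructor
  · intro h
    rw [Bool.and_eq_true] at h
    rcases h with ⟨hok, hj⟩
    have hpre := h1.mp hok
    have hlen : A.length = tgt.length := by
      rw [← h2 hok]; simpa using hj
    exact hpre.eq_of_length hlen
  · intro h
    subst h
    have hok : ok = true := h1.mpr (List.prefix_refl _)
    simp [hok, h2 hok]

theorem pvUpd_inv (tgt A : List Char) (j : Nat) (ok : Bool) (d : Char)
    (h1 : ok = true ↔ A <+: tgt) (h2 : ok = true → j = A.length) :
    ((pvUpd tgt j ok d).2 = true ↔ A ++ [d] <+: tgt) ∧
      ((pvUpd tgt j ok d).2 = true → (pvUpd tgt j ok d).1 = (A ++ [d]).length) := by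
  unfold pvUpd
  by_cases hc : (ok && (tgt[j]? == some d)) = true
  · rw [Bool.and_eq_true] at hc
    rcases hc with ⟨hok, hget⟩
    have hj := h2 hok
    have hg2 : tgt[j]? = some d := eq_of_beq hget
    have hpre : A ++ [d] <+: tgt :=
      (pv_prefix_snoc A d tgt).mpr ⟨h1.mp hok, by rw [← hj]; exact hg2⟩
    subst hj
    simp [hok, hg2, hpre]
  · rw [if_neg (by simpa using hc)]
    refine ⟨?_, by simp⟩
    simp only [Bool.false_eq_true, false_iff]
    intro hpre
    rcases (pv_prefix_snoc A d tgt).mp hpre with ⟨hp, hget⟩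
    have hok : ok = true := h1.mpr hp
    apply hc
    simp [hok, h2 hok, hget]

-- the per-item scan result, as a single Bool
def pvRes (tgt : List Char) (cs : List Char) (st : Nat × Bool × Nat × Bool) : Bool :=
  match pvScanB tgt cs st with
  | none => true
  | some (g, gok, p, pok) => (gok && (g == tgt.length)) || (pok && (p == tgt.length))

theorem pv_nrm_cons_tt (c : Char) (cs : List Char)
    (h : (decide (c.toNat ≤ 127) && PySem.Chars.isalnum c) = true) :
    pvNormB (c :: cs) = PySem.Chars.lowerChar c :: pvNormB cs := by
  simp [pvNormB, h]

theorem pv_nrm_cons_ff (c : Char) (cs : List Char)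
    (h : (decide (c.toNat ≤ 127) && PySem.Chars.isalnum c) = false) :
    pvNormB (c :: cs) = pvNormB cs := by
  simp [pvNormB, h]

theorem pvRes_nil (tgt : List Char) (g p : Nat) (gok pok : Bool) :
    pvRes tgt [] (g, gok, p, pok)
      = ((gok && (g == tgt.length)) || (pok && (p == tgt.length))) := rfl

theorem pvRes_slash (tgt cs : List Char) (g p : Nat) (gok pok : Bool) :
    pvRes tgt ('/' :: cs) (g, gok, p, pok)
      = if (pok && (p == tgt.length)) = true then true else pvRes tgt cs (g, gok, 0, true) := by
  by_cases h : (pok && (p == tgt.length)) = true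
  · simp only [pvRes, pvScanB, beq_self_eq_true, if_true, if_pos h]
  · simp only [pvRes, pvScanB, beq_self_eq_true, if_true, if_neg h]

theorem pvRes_alnum (tgt : List Char) (c : Char) (cs : List Char) (g p : Nat) (gok pok : Bool)
    (hne : (c == '/') = false) (hp : (decide (c.toNat ≤ 127) && PySem.Chars.isalnum c) = true) :
    pvRes tgt (c :: cs) (g, gok, p, pok)
      = pvRes tgt cs ((pvUpd tgt g gok (PySem.Chars.lowerChar c)).1,
          (pvUpd tgt g gok (PySem.Chars.lowerChar c)).2,
          (pvUpd tgt p pok (PySem.Chars.lowerChar c)).1,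
          (pvUpd tgt p pok (PySem.Chars.lowerChar c)).2) := by
  simp only [pvRes, pvScanB, hne, hp, Bool.false_eq_true, if_false, if_true]

theorem pvRes_other (tgt : List Char) (c : Char) (cs : List Char) (g p : Nat) (gok pok : Bool)
    (hne : (c == '/') = false) (hp : (decide (c.toNat ≤ 127) && PySem.Chars.isalnum c) = false) :
    pvRes tgt (c :: cs) (g, gok, p, pok) = pvRes tgt cs (g, gok, p, pok) := by
  simp only [pvRes, pvScanB, hne, hp, Bool.false_eq_true, if_false]

theorem pv_headI_modifyHead (l : List (List Char)) (f : List Char → List Char) (h : l ≠ []) :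
    (l.modifyHead f).headI = f l.headI := by
  cases l with
  | nil => exact absurd rfl h
  | cons a t => simp

theorem pv_tail_modifyHead (l : List (List Char)) (f : List Char → List Char) :
    (l.modifyHead f).tail = l.tail := by
  cases l <;> simp

theorem pvRes_spec (tgt : List Char) : ∀ (cs : List Char) (g p : Nat) (gok pok : Bool) (A B : List Char),
    (gok = true ↔ A <+: tgt) → (gok = true → g = A.length) →
    (pok = true ↔ B <+: tgt) → (pok = true → p = B.length) →
    (pvRes tgt cs (g, gok, p, pok) = true ↔
      A ++ pvNormB cs = tgt ∨ B ++ pvNormB (pvSplit cs).headI = tgt ∨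
        ∃ q ∈ (pvSplit cs).tail, pvNormB q = tgt) := by
  intro cs
  induction cs with
  | nil =>
    intro g p gok pok A B h1 h2 h3 h4
    rw [pvRes_nil, Bool.or_eq_true, pv_done_iff tgt A g gok h1 h2, pv_done_iff tgt B p pok h3 h4]
    simp [pvSplit, pvNormB]
  | cons c cs ih =>
    intro g p gok pok A B h1 h2 h3 h4
    by_cases hslash : c = '/'
    · subst hslash
      have hpred : (decide (('/').toNat ≤ 127) && PySem.Chars.isalnum '/') = false := by decide
      rw [pvRes_slash]
      have hsp : pvSplit ('/' :: cs) = [] :: pvSplit cs := by simp [pvSplit]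
      rw [pv_nrm_cons_ff _ _ hpred, hsp]
      by_cases hdone : (pok && (p == tgt.length)) = true
      · rw [if_pos hdone]
        have hB : B = tgt := (pv_done_iff tgt B p pok h3 h4).mp hdone
        simp [pvNormB, hB]
      · rw [if_neg hdone]
        have hB : ¬ (B = tgt) := fun h => hdone ((pv_done_iff tgt B p pok h3 h4).mpr h)
        rw [ih g 0 gok true A [] h1 h2 (by simp) (by simp)]
        have hdec : pvSplit cs = (pvSplit cs).headI :: (pvSplit cs).tail := by
          cases hxx : pvSplit cs with
          | nil => exact absurd hxx (pvSplit_ne_nil cs)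
          | cons a t => simp
        simp only [List.headI_cons, List.tail_cons, List.nil_append]
        constructor
        · rintro (h | h | h)
          · exact Or.inl h
          · refine Or.inr (Or.inr ?_)
            exact ⟨(pvSplit cs).headI, by rw [hdec]; simp, h⟩
          · rcases h with ⟨q, hq, h⟩
            refine Or.inr (Or.inr ⟨q, ?_, h⟩)
            rw [hdec]; simp [hq]
        · rintro (h | h | ⟨q, hq, h⟩)
          · exact Or.inl h
          · exact absurd (by simpa [pvNormB] using h) hB
          · rw [hdec] at hq
            rcases List.mem_cons.mp hq with rfl | hq
            · exact Or.inr (Or.inl h)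
            · exact Or.inr (Or.inr ⟨q, hq, h⟩)
    · have hne : (c == '/') = false := by simp [hslash]
      have hsp : pvSplit (c :: cs) = (pvSplit cs).modifyHead (c :: ·) := by
        simp [pvSplit, hslash]
      have hheadI : (pvSplit (c :: cs)).headI = c :: (pvSplit cs).headI := by
        rw [hsp, pv_headI_modifyHead _ _ (pvSplit_ne_nil cs)]
      have htail : (pvSplit (c :: cs)).tail = (pvSplit cs).tail := by
        rw [hsp, pv_tail_modifyHead]
      by_cases hp : (decide (c.toNat ≤ 127) && PySem.Chars.isalnum c) = true
      · rw [pvRes_alnum tgt c cs g p gok pok hne hp]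
        have hg := pvUpd_inv tgt A g gok (PySem.Chars.lowerChar c) h1 h2
        have hpk := pvUpd_inv tgt B p pok (PySem.Chars.lowerChar c) h3 h4
        rw [ih _ _ _ _ (A ++ [PySem.Chars.lowerChar c]) (B ++ [PySem.Chars.lowerChar c])
          hg.1 hg.2 hpk.1 hpk.2]
        rw [pv_nrm_cons_tt _ _ hp, hheadI, htail, pv_nrm_cons_tt _ _ hp]
        simp [List.append_assoc]
      · rw [pvRes_other tgt c cs g p gok pok hne (by simpa using hp)]
        rw [ih g p gok pok A B h1 h2 h3 h4]
        rw [pv_nrm_cons_ff _ _ (by simpa using hp), hheadI, htail,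
          pv_nrm_cons_ff _ _ (by simpa using hp)]

theorem pvItemB_iff (tgt : List Char) (item : List Char) :
    pvItemB tgt item = true ↔
      pvNormB item = tgt ∨ ∃ q ∈ pvSplit item, pvNormB q = tgt := by
  have h := pvRes_spec tgt item 0 0 true true [] []
    (by simp) (by simp) (by simp) (by simp)
  have hres : pvItemB tgt item = pvRes tgt item (0, true, 0, true) := rfl
  rw [hres, h]
  have hne := pvSplit_ne_nil item
  have hdec : pvSplit item = (pvSplit item).headI :: (pvSplit item).tail := by
    cases hs : pvSplit item with
    | nil => exact absurd hs hne
    | cons a t => simp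
  constructor
  · rintro (h | h | ⟨q, hq, h⟩)
    · exact Or.inl (by simpa using h)
    · exact Or.inr ⟨(pvSplit item).headI, by rw [hdec]; simp, by simpa using h⟩
    · exact Or.inr ⟨q, by rw [hdec]; simp [hq], h⟩
  · rintro (h | ⟨q, hq, h⟩)
    · exact Or.inl (by simpa using h)
    · rw [hdec] at hq
      rcases List.mem_cons.mp hq with rfl | hq
      · exact Or.inr (Or.inl (by simpa using h))
      · exact Or.inr (Or.inr ⟨q, hq, h⟩)

theorem pvLoopB_iff (tgt : List Char) (items : List String) :
    pvLoopB tgt items = true ↔ ∃ item ∈ items, pvItemB tgt item.toList = true := by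
  induction items with
  | nil => simp [pvLoopB]
  | cons item rest ih =>
    simp only [pvLoopB]
    split_ifs with h
    · simp only [true_iff]
      exact ⟨item, by simp, h⟩
    · rw [ih]
      constructor
      · rintro ⟨i, hi, hh⟩; exact ⟨i, by simp [hi], hh⟩
      · rintro ⟨i, hi, hh⟩
        rcases List.mem_cons.mp hi with rfl | hi
        · exact absurd hh h
        · exact ⟨i, hi, hh⟩

-- ===== VERDICT =====
theorem device_in_supported_list_py_spec : Claim_equal_device_in_supported_list_py := by
  intro device_id list_items _
  unfold Spec_device_in_supported_list_py device_in_supported_list_py device_in_supported_list_py_alt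
  rw [Bool.eq_iff_iff, pvLoopA_iff, pvLoopB_iff]
  refine exists_congr fun item => and_congr_right fun _ => ?_
  rw [pvItemB_iff, pv_splitOn_eq]
  simp only [← pvNormA_eq_pvNormB]
  exact or_congr Iff.rfl
    (exists_congr fun part => and_congr_right fun _ => by rw [pvNormA_strip])
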